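-- pv_equiv track=rewrite | github.com/kurrrru/skyscraper | src/gn.py | calculate_clues
-- ===== SOURCE A (Python) =====
-- from typing import List
--
-- def count_visible(line: List[int]) -> int:
--     """Counts the number of visible buildings in a single line."""
--     max_height = 0
--     seen_count = 0
--     for height in line:
--         if height > max_height:
--             max_height = height
--             seen_count += 1
--     return seen_count
--
-- def calculate_clues(grid: List[List[int]]) -> List[int]:
--     """
--     Calculates the peripheral clues from a given solution grid.
--     """
--     n = len(grid)
--     clues_top = [0] * n
--     clues_bottom = [0] * n
--     clues_left = [0] * n
--     clues_right = [0] * n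
--
--     for i in range(n):
--         row = grid[i]
--         clues_left[i] = count_visible(row)
--         clues_right[i] = count_visible(row[::-1])
--
--     for j in range(n):
--         col = [grid[i][j] for i in range(n)]
--         clues_top[j] = count_visible(col)
--         clues_bottom[j] = count_visible(col[::-1])
--
--     # Concatenate clues in the required order for the C++ solver.
--     return clues_top + clues_bottom + clues_left + clues_right
-- ===== SOURCE B (Python) =====
-- from typing import List
--
-- def calculate_clues(grid: List[List[int]]) -> List[int]:
--     n = len(grid)
--
--     def sweep(rows, backward):
--         # Online sweep: a vector of per-column (running max, count) accumulators is
--         # updated row by row; columns are never materialized. The same pass also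
--         # counts each row's clue (scanning it backward for the far-end sweep).
--         col = [(0, 0)] * n
--         row_cnts = []
--         for row in rows:
--             col = [(row[k], c + 1) if row[k] > m else (m, c) for k, (m, c) in enumerate(col)]
--             m = c = 0
--             for h in (reversed(row) if backward else row):
--                 if h > m:
--                     m, c = h, c + 1
--             row_cnts.append(c)
--         return [c for _, c in col], row_cnts
--
--     top, left = sweep(grid, False)
--     bottom, right_r = sweep(grid[::-1], True)
--     return top + bottom + left + right_r[::-1]
-- ===== Notes on version B (the rewrite author's own statement) =====
-- stated objective: alternative
-- what changed: B replaces A's column-extraction-plus-per-line-helper scheme by an online sweep: it never materializes a column or a reversed copy of one; instead each pass over the rows zips a vector of per-column (running max, count) accumulators with the row, computing all top (resp. bottom) clues incrementally while the same pass produces the row clues.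
import Mathlib
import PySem

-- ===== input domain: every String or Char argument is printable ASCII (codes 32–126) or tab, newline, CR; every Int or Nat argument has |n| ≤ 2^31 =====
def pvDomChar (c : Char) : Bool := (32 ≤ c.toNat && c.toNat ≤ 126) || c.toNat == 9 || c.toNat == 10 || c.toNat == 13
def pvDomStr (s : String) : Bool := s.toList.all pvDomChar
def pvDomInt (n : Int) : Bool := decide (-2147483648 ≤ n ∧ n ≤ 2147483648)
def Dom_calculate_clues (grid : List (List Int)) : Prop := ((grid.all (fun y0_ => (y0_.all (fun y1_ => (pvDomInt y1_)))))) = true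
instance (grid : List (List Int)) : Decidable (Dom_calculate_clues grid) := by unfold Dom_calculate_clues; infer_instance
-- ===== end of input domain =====

-- B replaces A's column extraction + per-line helper calls by two online sweeps over the
-- rows maintaining a vector of per-column (running max, count) accumulators; objective:
-- alternative algorithmic organisation, same asymptotic cost.

-- ===== PORT A =====
def count_visible (line : List Int) : Int :=
  (line.foldl (fun (s : Int × Int) h => if h > s.1 then (h, s.2 + 1) else s) (0, 0)).2

def calculate_clues (grid : List (List Int)) : List Int :=
  let n := grid.length
  let clues_left := (List.range n).map (fun (i : Nat) =>
    count_visible ((PySem.List.pyGet? grid (i : Int)).getD []))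
  let clues_right := (List.range n).map (fun (i : Nat) =>
    count_visible ((PySem.List.pyGet? grid (i : Int)).getD []).reverse)
  let clues_top := (List.range n).map (fun (j : Nat) =>
    count_visible ((List.range n).map (fun (i : Nat) =>
      (PySem.List.pyGet? ((PySem.List.pyGet? grid (i : Int)).getD []) (j : Int)).getD 0)))
  let clues_bottom := (List.range n).map (fun (j : Nat) =>
    count_visible ((List.range n).map (fun (i : Nat) =>
      (PySem.List.pyGet? ((PySem.List.pyGet? grid (i : Int)).getD []) (j : Int)).getD 0)).reverse)
  clues_top ++ clues_bottom ++ clues_left ++ clues_right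

-- ===== PORT B =====
def sweep_alt (n : Nat) (rows : List (List Int)) (backward : Bool) : List Int × List Int :=
  let res := rows.foldl
    (fun (st : List (Int × Int) × List Int) row =>
      ((PySem.List.enumerate st.1).map (fun q =>
         if (PySem.List.pyGet? row q.1).getD 0 > q.2.1
         then ((PySem.List.pyGet? row q.1).getD 0, q.2.2 + 1) else q.2),
       st.2 ++ [((if backward then row.reverse else row).foldl
          (fun (s : Int × Int) h => if h > s.1 then (h, s.2 + 1) else s) (0, 0)).2]))
    (List.replicate n (0, 0), [])
  (res.1.map Prod.snd, res.2)

def calculate_clues_alt (grid : List (List Int)) : List Int :=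
  let n := grid.length
  let tl := sweep_alt n grid false
  let br := sweep_alt n grid.reverse true
  tl.1 ++ br.1 ++ tl.2 ++ br.2.reverse

-- ===== PRECONDITION & SPEC =====
-- Pre_ excludes exactly the ragged grids with a row shorter than the number of rows,
-- on which Python A raises IndexError while building a column.
def Pre_calculate_clues (grid : List (List Int)) : Prop :=
  ∀ row ∈ grid, grid.length ≤ row.length
instance (grid : List (List Int)) : Decidable (Pre_calculate_clues grid) := by
  unfold Pre_calculate_clues; infer_instance

def pvWitness_calculate_clues : List (List Int) := [[3, 1], [2, 3]]

def Spec_calculate_clues (grid : List (List Int)) (out : List Int) : Prop := out = calculate_clues_alt grid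
instance (grid : List (List Int)) (out : List Int) : Decidable (Spec_calculate_clues grid out) := by unfold Spec_calculate_clues; infer_instance

-- ===== CLAIM (what is proved, stated in full; the proofs are below) =====
def Claim_equal_calculate_clues : Prop := ∀ (grid : List (List Int)), Dom_calculate_clues grid → Pre_calculate_clues grid → Spec_calculate_clues grid (calculate_clues grid)

-- ===== LEMMAS AND PROOFS =====

-- the record-counting step shared by both ports' folds
def cvStep (s : Int × Int) (h : Int) : Int × Int := if h > s.1 then (h, s.2 + 1) else s

-- the per-row column-vector update of B
def colStep (c : List (Int × Int)) (row : List Int) : List (Int × Int) :=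
  (PySem.List.enumerate c).map (fun q =>
    if (PySem.List.pyGet? row q.1).getD 0 > q.2.1
    then ((PySem.List.pyGet? row q.1).getD 0, q.2.2 + 1) else q.2)

theorem count_visible_eq (line : List Int) :
    count_visible line = (line.foldl cvStep (0, 0)).2 := rfl

-- the forward sweep fold splits into the column fold and the row-count map
theorem sweep_split_false :
    ∀ (rows : List (List Int)) (c : List (Int × Int)) (acc : List Int),
      rows.foldl
        (fun (st : List (Int × Int) × List Int) row =>
          ((PySem.List.enumerate st.1).map (fun q =>
             if (PySem.List.pyGet? row q.1).getD 0 > q.2.1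
             then ((PySem.List.pyGet? row q.1).getD 0, q.2.2 + 1) else q.2),
           st.2 ++ [(row.foldl
              (fun (s : Int × Int) h => if h > s.1 then (h, s.2 + 1) else s) (0, 0)).2]))
        (c, acc)
      = (rows.foldl colStep c, acc ++ rows.map count_visible) := by
  intro rows
  induction rows with
  | nil => simp
  | cons row rest ih =>
    intro c acc
    simp only [List.foldl_cons, ih, colStep, List.map_cons, List.append_assoc,
      List.singleton_append, count_visible_eq]
    rfl

-- the backward sweep fold splits likewise, counting each row reversed
theorem sweep_split_true :
    ∀ (rows : List (List Int)) (c : List (Int × Int)) (acc : List Int),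
      rows.foldl
        (fun (st : List (Int × Int) × List Int) row =>
          ((PySem.List.enumerate st.1).map (fun q =>
             if (PySem.List.pyGet? row q.1).getD 0 > q.2.1
             then ((PySem.List.pyGet? row q.1).getD 0, q.2.2 + 1) else q.2),
           st.2 ++ [(row.reverse.foldl
              (fun (s : Int × Int) h => if h > s.1 then (h, s.2 + 1) else s) (0, 0)).2]))
        (c, acc)
      = (rows.foldl colStep c, acc ++ rows.map (fun row => count_visible row.reverse)) := by
  intro rows
  induction rows with
  | nil => simp
  | cons row rest ih =>
    intro c acc
    simp only [List.foldl_cons, ih, colStep, List.map_cons, List.append_assoc,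
      List.singleton_append, count_visible_eq]
    rfl

theorem colStep_length (c : List (Int × Int)) (row : List Int) :
    (colStep c row).length = c.length := by
  simp [colStep]

-- folding the column-vector update over the rows computes each column's record fold
theorem colfold_eq :
    ∀ (rows : List (List Int)) (c : List (Int × Int)),
      (∀ row ∈ rows, c.length ≤ row.length) →
      rows.foldl colStep c
        = (List.range c.length).map
            (fun j => (rows.map (fun row => row.getD j 0)).foldl cvStep (c.getD j (0, 0))) := by
  intro rows
  induction rows with
  | nil =>
    intro c _
    apply List.ext_getElem
    · simp
    · intro j h1 h2
      have hj : j < c.length := by simpa using h1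
      simp [List.getD_eq_getElem?_getD, List.getElem?_eq_getElem hj]
  | cons row rest ih =>
    intro c hlen
    have hcr : c.length ≤ row.length := hlen row (by simp)
    have hlen' : ∀ r ∈ rest, (colStep c row).length ≤ r.length := by
      intro r hr; rw [colStep_length c row]; exact hlen r (by simp [hr])
    rw [List.foldl_cons, ih (colStep c row) hlen', colStep_length c row]
    apply List.map_congr_left
    intro j hj
    have hjn : j < c.length := List.mem_range.mp hj
    have hjr : j < row.length := lt_of_lt_of_le hjn hcr
    have hget : (colStep c row).getD j (0, 0) = cvStep (c.getD j (0, 0)) (row.getD j 0) := by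
      simp [colStep, cvStep, List.getD_eq_getElem?_getD, List.getElem?_map,
        PySem.List.getElem?_enumerate, List.getElem?_eq_getElem hjn,
        List.getElem?_eq_getElem hjr]
    simp only [List.map_cons, List.foldl_cons]
    congr 1

-- in-range pyGet? over range (length) is just mapping over the list
theorem map_pyGet_range {β : Type} (l : List (List Int)) (f : List Int → β) :
    (List.range l.length).map (fun (i : Nat) => f ((PySem.List.pyGet? l (i : Int)).getD [])) = l.map f := by
  apply List.ext_getElem
  · simp
  · intro i h1 h2
    have : i < l.length := by simpa using h2
    simp [List.getElem?_eq_getElem this]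

-- A's extracted column j equals mapping the j-th entry over the rows
theorem column_eq (grid : List (List Int)) (hpre : ∀ row ∈ grid, grid.length ≤ row.length)
    (j : Nat) (hj : j < grid.length) :
    (List.range grid.length).map (fun (i : Nat) =>
        (PySem.List.pyGet? ((PySem.List.pyGet? grid (i : Int)).getD []) (j : Int)).getD 0)
      = grid.map (fun row => row.getD j 0) := by
  apply List.ext_getElem
  · simp
  · intro i h1 h2
    have hi : i < grid.length := by simpa using h2
    have hjr : j < grid[i].length :=
      lt_of_lt_of_le hj (hpre grid[i] (List.getElem_mem hi))
    simp [hi, hjr, List.getD_eq_getElem?_getD]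

-- ===== VERDICT (by name: the statement is the Claim_ definition above) =====
theorem calculate_clues_spec : Claim_equal_calculate_clues := by
  intro grid _ hpre
  show calculate_clues grid = calculate_clues_alt grid
  have hprerev : ∀ row ∈ grid.reverse, grid.length ≤ row.length := fun row hr =>
    hpre row (List.mem_reverse.mp hr)
  have hrepl : ∀ rows : List (List Int), (∀ row ∈ rows, grid.length ≤ row.length) →
      rows.foldl colStep (List.replicate grid.length ((0 : Int), (0 : Int)))
        = (List.range grid.length).map
            (fun j => (rows.map (fun row => row.getD j 0)).foldl cvStep (0, 0)) := by
    intro rows h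
    rw [colfold_eq rows _ (by simpa using h)]
    simp
  have htop : (List.range grid.length).map (fun (j : Nat) =>
        count_visible ((List.range grid.length).map (fun (i : Nat) =>
          (PySem.List.pyGet? ((PySem.List.pyGet? grid (i : Int)).getD []) (j : Int)).getD 0)))
      = (List.range grid.length).map (fun (j : Nat) =>
          count_visible (grid.map (fun row => row.getD j 0))) := by
    apply List.map_congr_left
    intro j hj
    rw [column_eq grid hpre j (List.mem_range.mp hj)]
  have hbot : (List.range grid.length).map (fun (j : Nat) =>
        count_visible ((List.range grid.length).map (fun (i : Nat) =>
          (PySem.List.pyGet? ((PySem.List.pyGet? grid (i : Int)).getD []) (j : Int)).getD 0)).reverse)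
      = (List.range grid.length).map (fun (j : Nat) =>
          count_visible ((grid.map (fun row => row.getD j 0)).reverse)) := by
    apply List.map_congr_left
    intro j hj
    rw [column_eq grid hpre j (List.mem_range.mp hj)]
  simp only [calculate_clues, calculate_clues_alt, sweep_alt]
  simp only [show ((false : Bool) = true) = False from by simp, if_true, if_false]
  simp only [sweep_split_false, sweep_split_true, hrepl grid hpre, hrepl grid.reverse hprerev,
    htop, hbot, List.map_map, Function.comp_def, ← count_visible_eq,
    map_pyGet_range grid count_visible,
    map_pyGet_range grid (fun row => count_visible row.reverse),
    List.map_reverse, List.reverse_reverse, List.nil_append]
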